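-- pv_equiv track=rewrite | github.com/babyfaceEasy/ideserve | majority_elt.py | majorityElt
-- ===== SOURCE A (Python) =====
-- def majorityElt(ls):
-- 	for x in range(0, len(ls)):
-- 		currElt =  ls[x]
-- 		times = len(ls) // 2
-- 		count = 0
-- 		for i in range(x,len(ls)):
-- 			if ls[i] == currElt:
-- 				count = count + 1
--
-- 		if count > times:
-- 			return currElt
--
-- 	return None
-- ===== SOURCE B (Python) =====
-- def majorityElt(ls):
--     counts = {}
--     for v in ls:
--         counts[v] = counts.get(v, 0) + 1
--     half = len(ls) // 2
--     for v, c in counts.items():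
--         if c > half:
--             return v
--     return None
-- ===== Notes on version B (the rewrite author's own statement) =====
-- stated objective: faster
-- what changed: Replaced the quadratic scan (for each start index, re-count the element over the suffix) by a single counting pass with a dict followed by one scan of the distinct elements; correct because only the unique strict-majority element can ever pass the '> len//2' test.
import Mathlib
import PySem

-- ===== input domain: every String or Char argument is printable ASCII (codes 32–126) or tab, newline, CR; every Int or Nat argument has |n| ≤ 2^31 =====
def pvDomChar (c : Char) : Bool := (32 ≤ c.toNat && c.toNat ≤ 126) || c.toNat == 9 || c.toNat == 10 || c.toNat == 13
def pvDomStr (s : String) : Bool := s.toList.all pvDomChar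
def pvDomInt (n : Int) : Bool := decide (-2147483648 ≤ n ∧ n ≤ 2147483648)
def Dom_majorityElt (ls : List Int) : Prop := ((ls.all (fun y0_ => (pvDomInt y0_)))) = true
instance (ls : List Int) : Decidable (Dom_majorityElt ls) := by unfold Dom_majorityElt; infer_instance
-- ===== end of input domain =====

-- B replaces A's quadratic suffix-recount with one counting pass over a dict plus one scan; proved to return the same value on every input.

-- ===== PORT A =====
-- Outer loop 'for x in range(0, len(ls))' with 'return' ported as structural recursion on the
-- suffix ls[x:]; the inner loop 'for i in range(x, len(ls)): if ls[i] == currElt: count += 1'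
-- visits exactly the elements of that suffix, ported as the fold counting them.
def majorityGoA (half : Int) : List Int → Option Int
  | [] => none
  | currElt :: rest =>
    let count : Int := (currElt :: rest).foldl (fun cnt v => if v = currElt then cnt + 1 else cnt) 0
    if count > half then some currElt else majorityGoA half rest

def majorityElt (ls : List Int) : Option Int :=
  majorityGoA (PySem.Int.floordiv (ls.length : Int) 2) ls

-- ===== PORT B =====
-- 'for v, c in counts.items(): if c > half: return v' of Source B
def majorityScanB (half : Int) : List (Int × Int) → Option Int
  | [] => none
  | (v, c) :: rest => if c > half then some v else majorityScanB half rest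

def majorityElt_alt (ls : List Int) : Option Int :=
  let counts := ls.foldl (fun d v => d.insert v (d.getD v 0 + 1)) (PySem.Dict.empty)
  let half := PySem.Int.floordiv (ls.length : Int) 2
  majorityScanB half counts.items

-- ===== PRECONDITION & SPEC =====
def Spec_majorityElt (ls : List Int) (out : Option Int) : Prop := out = majorityElt_alt ls
instance (ls : List Int) (out : Option Int) : Decidable (Spec_majorityElt ls out) := by unfold Spec_majorityElt; infer_instance

-- ===== CLAIM (what is proved, stated in full; the proofs are below) =====
def Claim_equal_majorityElt : Prop := ∀ (ls : List Int), Dom_majorityElt ls → Spec_majorityElt ls (majorityElt ls)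

-- ===== LEMMAS AND PROOFS =====

-- the inner-loop fold is a count
theorem foldA_eq_count (t : List Int) (c : Int) (acc : Int) :
    t.foldl (fun cnt v => if v = c then cnt + 1 else cnt) acc = acc + (t.count c : Int) := by
  induction t generalizing acc with
  | nil => simp
  | cons x rest ih =>
    by_cases hx : x = c
    · subst hx; simp [List.foldl_cons, ih]; ring
    · simp [List.foldl_cons, hx, ih]

-- A's scan returns only a strict suffix-majority element
theorem goA_some (half : Int) (t : List Int) (m : Int)
    (h : majorityGoA half t = some m) : m ∈ t ∧ half < (t.count m : Int) := by
  induction t with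
  | nil => simp [majorityGoA] at h
  | cons c rest ih =>
    simp only [majorityGoA, foldA_eq_count, zero_add] at h
    split_ifs at h with hc
    · cases h; exact ⟨List.mem_cons_self, hc⟩
    · obtain ⟨hm, hcnt⟩ := ih h
      refine ⟨List.mem_cons_of_mem _ hm, lt_of_lt_of_le hcnt ?_⟩
      exact_mod_cast List.count_le_count_cons

theorem goA_none (half : Int) (t : List Int)
    (h : majorityGoA half t = none) : ∀ m ∈ t, (t.count m : Int) ≤ half := by
  induction t with
  | nil => intro m hm; simp at hm
  | cons c rest ih =>
    simp only [majorityGoA, foldA_eq_count, zero_add] at h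
    split_ifs at h with hc
    intro m hm
    rcases List.mem_cons.mp hm with rfl | hm'
    · omega
    · by_cases hmc : m = c
      · subst hmc; omega
      · have hr : (rest.count m : Int) ≤ half := ih h m hm'
        rw [List.count_cons_of_ne (Ne.symm hmc)]
        exact hr

-- B's scan over pairs (k, g k)
theorem scanB_some (half : Int) (g : Int → Int) (ks : List Int) (m : Int)
    (h : majorityScanB half (ks.map (fun k => (k, g k))) = some m) :
    m ∈ ks ∧ half < g m := by
  induction ks with
  | nil => simp [majorityScanB] at h
  | cons k rest ih =>
    simp only [List.map_cons, majorityScanB] at h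
    split_ifs at h with hc
    · cases h; exact ⟨List.mem_cons_self, hc⟩
    · obtain ⟨hm, hg⟩ := ih h
      exact ⟨List.mem_cons_of_mem _ hm, hg⟩

theorem scanB_none (half : Int) (g : Int → Int) (ks : List Int)
    (h : majorityScanB half (ks.map (fun k => (k, g k))) = none) :
    ∀ k ∈ ks, g k ≤ half := by
  induction ks with
  | nil => intro k hk; simp at hk
  | cons k rest ih =>
    simp only [List.map_cons, majorityScanB] at h
    split_ifs at h with hc
    intro j hj
    rcases List.mem_cons.mp hj with rfl | hj'
    · omega
    · exact ih h j hj'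

-- two distinct elements cannot both be strict majorities
theorem count_add_count_le (a b : Int) (ls : List Int) (hne : a ≠ b) :
    ls.count a + ls.count b ≤ ls.length := by
  induction ls with
  | nil => simp
  | cons c rest ih =>
    simp only [List.count_cons, List.length_cons, beq_iff_eq]
    split_ifs with ha hb hb
    · exact (hne (by omega)).elim
    · omega
    · omega
    · omega

-- B's items are exactly (k, count k) over the distinct elements of ls
theorem alt_eq_scan (ls : List Int) :
    majorityElt_alt ls =
      majorityScanB (PySem.Int.floordiv (ls.length : Int) 2)
        ((PySem.Set.ofList ls).map (fun k => (k, (ls.count k : Int)))) := by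
  simp only [majorityElt_alt, PySem.Dict.foldl_insert_getD_add_one_eq_counter,
    PySem.Dict.items_counter]

theorem majorityElt_spec' (ls : List Int) : majorityElt ls = majorityElt_alt ls := by
  rw [alt_eq_scan]
  have hhalf : PySem.Int.floordiv (ls.length : Int) 2 = ((ls.length / 2 : Nat) : Int) := by
    exact_mod_cast PySem.Int.floordiv_natCast ls.length 2
  set half := PySem.Int.floordiv (ls.length : Int) 2 with hh
  unfold majorityElt
  rw [← hh]
  cases hA : majorityGoA half ls with
  | none =>
    have hAn := goA_none half ls hA
    cases hB : majorityScanB half ((PySem.Set.ofList ls).map (fun k => (k, (ls.count k : Int)))) with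
    | none => rfl
    | some b =>
      obtain ⟨hbmem, hbcnt⟩ := scanB_some half _ _ b hB
      have hbls : b ∈ ls := (PySem.Set.mem_ofList ls b).mp hbmem
      have := hAn b hbls
      omega
  | some a =>
    obtain ⟨hamem, hacnt⟩ := goA_some half ls a hA
    cases hB : majorityScanB half ((PySem.Set.ofList ls).map (fun k => (k, (ls.count k : Int)))) with
    | none =>
      have hBn := scanB_none half _ _ hB
      have : (ls.count a : Int) ≤ half := hBn a ((PySem.Set.mem_ofList ls a).mpr hamem)
      omega
    | some b =>
      obtain ⟨hbmem, hbcnt⟩ := scanB_some half _ _ b hB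
      have hbls : b ∈ ls := (PySem.Set.mem_ofList ls b).mp hbmem
      by_cases hab : a = b
      · rw [hab]
      · exfalso
        have hsum := count_add_count_le a b ls hab
        have h2 : ((ls.length / 2 : Nat) : Int) = half := hhalf.symm
        have hca : half < (ls.count a : Int) := hacnt
        have hcb : half < (ls.count b : Int) := hbcnt
        have : (ls.count a : Int) + (ls.count b : Int) ≤ (ls.length : Int) := by exact_mod_cast hsum
        omega

-- ===== VERDICT (by name: the statement is the Claim_ definition above) =====
theorem majorityElt_spec : Claim_equal_majorityElt := by
  intro ls _
  unfold Spec_majorityElt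
  exact majorityElt_spec' ls
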